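-- pv_equiv track=rewrite | github.com/sotheanith-sok/Leetcode | 2120. Execution of All Suffix Instructions Staying in a Grid.py | executeInstructions
-- ===== SOURCE A (Python) =====
-- def executeInstructions(n: int, startPos: list[int], s: str) -> list[int]:
--
--     # Find the number of instructions
--     m = len(s)
--
--     # A helper function for four directional movements
--     directions = {"R": (0, 1), "L": (0, -1), "U": (-1, 0), "D": (1, 0)}
--
--     # Initialize the number of moves possible before we hit a boundary for all 4 directions
--     left, right, up, down = (
--         -1 - startPos[1],
--         n - startPos[1],
--         -1 - startPos[0],
--         n - startPos[0],
--     )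
--
--     # Intialize dicts to keep track of indices where we made each moves
--     rows, cols = {0: m}, {0: m}
--
--     # Intialize a varaible to keep track of the current moves
--     row, col = 0, 0
--
--     # Initialize the result
--     res = []
--
--     # Iterate through all instruction starting from the end
--     for i in range(m - 1, -1, -1):
--
--         # Find the direction
--         dRow, dCol = directions[s[i]]
--
--         # Update the current move
--         row, col = row + dRow, col + dCol
--
--         # Initialize the number of instruction executable if we didn't reach a boundary
--         exe = m - i
--
--         # If we reach the top boundary, update the number of instruction executable
--         if row - up in rows:
--             exe = min(exe, rows[row - up] - i - 1)
--
--         # If we reach the bottom boundary, update the number of instruction executable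
--         if row - down in rows:
--             exe = min(exe, rows[row - down] - i - 1)
--
--         # If we reach the left boundary, update the number of instruction executable
--         if col - left in cols:
--             exe = min(exe, cols[col - left] - i - 1)
--
--         # If we reach the right boundary, update the number of instruction executable
--         if col - right in cols:
--             exe = min(exe, cols[col - right] - i - 1)
--
--         # Save the current index and moves into dicts
--         rows[row], cols[col] = i, i
--
--         # Append the number of instruction executable into the result
--         res.append(exe)
--
--     return res[::-1]
-- ===== SOURCE B (Python) =====
-- def executeInstructions(n: int, startPos: list[int], s: str) -> list[int]:
--     # Naive forward simulation of every suffix: walk until a step lands on the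
--     # boundary ring (row or col equal to -1 or n), which for unit steps is
--     # exactly the first step off the grid.
--     deltas = {"R": (0, 1), "L": (0, -1), "U": (-1, 0), "D": (1, 0)}
--     m = len(s)
--     res = []
--     for i in range(m):
--         r, c = startPos[0], startPos[1]
--         cnt = 0
--         for ch in s[i:]:
--             dr, dc = deltas[ch]
--             r += dr
--             c += dc
--             if r == -1 or r == n or c == -1 or c == n:
--                 break
--             cnt += 1
--         res.append(cnt)
--     return res
-- ===== Notes on version B (the rewrite author's own statement) =====
-- stated objective: simpler
-- what changed: Replaced A's reverse pass with cumulative displacements and dict index tables keyed by boundary offsets by a direct forward re-simulation of every suffix (walk and break on the first step that lands on the boundary ring row/col = -1 or n).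
import Mathlib
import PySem

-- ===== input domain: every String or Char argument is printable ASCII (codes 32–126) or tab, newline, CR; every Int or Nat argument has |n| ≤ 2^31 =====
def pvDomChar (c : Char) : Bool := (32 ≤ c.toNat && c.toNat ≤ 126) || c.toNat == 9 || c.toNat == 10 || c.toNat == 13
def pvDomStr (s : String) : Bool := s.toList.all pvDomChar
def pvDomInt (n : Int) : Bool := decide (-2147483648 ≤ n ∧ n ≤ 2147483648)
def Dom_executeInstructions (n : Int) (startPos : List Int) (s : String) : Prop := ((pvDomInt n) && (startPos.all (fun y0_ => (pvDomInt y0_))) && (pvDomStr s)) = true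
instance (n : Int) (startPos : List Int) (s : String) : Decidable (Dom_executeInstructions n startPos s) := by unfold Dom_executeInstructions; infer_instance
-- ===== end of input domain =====

-- B replaces A's reverse cumulative-displacement pass with dict index tables by a direct
-- forward re-simulation of every suffix (objective: simpler, not faster).

-- ===== PORT A =====
-- the 'directions' dict of A (and 'deltas' of B), as the two component functions
def dRow (ch : Char) : Int := if ch = 'U' then -1 else if ch = 'D' then 1 else 0
def dCol (ch : Char) : Int := if ch = 'R' then 1 else if ch = 'L' then -1 else 0

-- one 'if key in dict: exe = min(exe, dict[key] - i - 1)' step of A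
def arm (exe : Int) (o : Option Int) (i : Int) : Int :=
  match o with
  | some j => min exe (j - i - 1)
  | none => exe

-- the four boundary checks of A's loop body, in A's order
def exeStep (rows cols : PySem.Dict Int Int) (row col up down left right i exe0 : Int) : Int :=
  arm (arm (arm (arm exe0 (rows.get? (row - up)) i) (rows.get? (row - down)) i)
        (cols.get? (col - left)) i) (cols.get? (col - right)) i

-- A's loop 'for i in range(m-1, -1, -1)': argument k+1 processes index i = k; every call has k < m
def goA (cs : List Char) (m : Nat) (up down left right : Int) :
    Nat → PySem.Dict Int Int → PySem.Dict Int Int → Int → Int → List Int → List Int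
  | 0, _, _, _, _, res => res
  | (k+1), rows, cols, row, col, res =>
    let i : Int := (k : Int)
    let ch := cs.getD k ' '                      -- s[i]; in range on every call (k < m)
    let row' := row + dRow ch
    let col' := col + dCol ch
    let exe := exeStep rows cols row' col' up down left right i ((m : Int) - i)
    goA cs m up down left right k (rows.insert row' i) (cols.insert col' i) row' col' (res ++ [exe])

def executeInstructions (n : Int) (startPos : List Int) (s : String) : List Int :=
  let cs := s.toList
  let m := cs.length
  let p0 := startPos.getD 0 0                    -- startPos[0]; Pre_ requires length ≥ 2
  let p1 := startPos.getD 1 0                    -- startPos[1]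
  let left := -1 - p1
  let right := n - p1
  let up := -1 - p0
  let down := n - p0
  let rows0 : PySem.Dict Int Int := PySem.Dict.empty.insert 0 (m : Int)   -- {0: m}
  let cols0 : PySem.Dict Int Int := PySem.Dict.empty.insert 0 (m : Int)   -- {0: m}
  (goA cs m up down left right m rows0 cols0 0 0 []).reverse              -- res[::-1]

-- ===== PORT B =====
-- B's inner loop: walk the suffix, break when a step lands on the boundary ring
def simulateB (n : Int) : Int → Int → List Char → Int
  | _, _, [] => 0
  | r, c, ch :: rest =>
    let r' := r + dRow ch
    let c' := c + dCol ch
    if r' = -1 ∨ r' = n ∨ c' = -1 ∨ c' = n then 0 else 1 + simulateB n r' c' rest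

def executeInstructions_alt (n : Int) (startPos : List Int) (s : String) : List Int :=
  let cs := s.toList
  (List.range cs.length).map
    (fun i => simulateB n (startPos.getD 0 0) (startPos.getD 1 0) (cs.drop i))

-- ===== PRECONDITION & SPEC =====
-- Pre_ excludes exactly the inputs where Python A raises: startPos shorter than 2 (IndexError)
-- and instruction characters outside "RLUD" (KeyError on the directions dict).
def Pre_executeInstructions (n : Int) (startPos : List Int) (s : String) : Prop :=
  2 ≤ startPos.length ∧
  (s.toList.all (fun ch => ch == 'R' || ch == 'L' || ch == 'U' || ch == 'D')) = true

instance (n : Int) (startPos : List Int) (s : String) : Decidable (Pre_executeInstructions n startPos s) := by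
  unfold Pre_executeInstructions; infer_instance

def pvWitness_executeInstructions : Int × List Int × String := (4, [1, 2], "RLUD")

def Spec_executeInstructions (n : Int) (startPos : List Int) (s : String) (out : List Int) : Prop := out = executeInstructions_alt n startPos s
instance (n : Int) (startPos : List Int) (s : String) (out : List Int) : Decidable (Spec_executeInstructions n startPos s out) := by unfold Spec_executeInstructions; infer_instance

-- ===== CLAIM (what is proved, stated in full; the proofs are below) =====
def Claim_equal_executeInstructions : Prop := ∀ (n : Int) (startPos : List Int) (s : String), Dom_executeInstructions n startPos s → Pre_executeInstructions n startPos s → Spec_executeInstructions n startPos s (executeInstructions n startPos s)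

-- ===== LEMMAS AND PROOFS =====

-- cumulative row/column displacement of the suffix starting at j
def Rsum (cs : List Char) (j : Nat) : Int := ((cs.drop j).map dRow).sum
def Csum (cs : List Char) (j : Nat) : Int := ((cs.drop j).map dCol).sum

-- after t steps of the suffix at i, started at (r, c), no coordinate sits on the boundary ring
def goodA (n : Int) (cs : List Char) (i : Nat) (r c : Int) (t : Nat) : Prop :=
  r + Rsum cs i - Rsum cs (i + t) ≠ -1 ∧ r + Rsum cs i - Rsum cs (i + t) ≠ n ∧
  c + Csum cs i - Csum cs (i + t) ≠ -1 ∧ c + Csum cs i - Csum cs (i + t) ≠ n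

-- characterisation of "number of executable instructions of the suffix at i from (r, c)"
def CharA (n : Int) (cs : List Char) (i : Nat) (r c e : Int) : Prop :=
  0 ≤ e ∧ e ≤ (cs.length : Int) - (i : Int) ∧
  (∀ t : Nat, 1 ≤ t → (t : Int) ≤ e → goodA n cs i r c t) ∧
  (e = (cs.length : Int) - (i : Int) ∨ ¬ goodA n cs i r c (e.toNat + 1))

lemma Rsum_succ (cs : List Char) (j : Nat) (hj : j < cs.length) :
    Rsum cs j = dRow (cs.getD j ' ') + Rsum cs (j + 1) := by
  unfold Rsum
  rw [List.drop_eq_getElem_cons hj, List.getD_eq_getElem cs ' ' hj]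
  rw [List.map_cons, List.sum_cons]

lemma Csum_succ (cs : List Char) (j : Nat) (hj : j < cs.length) :
    Csum cs j = dCol (cs.getD j ' ') + Csum cs (j + 1) := by
  unfold Csum
  rw [List.drop_eq_getElem_cons hj, List.getD_eq_getElem cs ' ' hj]
  rw [List.map_cons, List.sum_cons]

lemma goodA_one (n : Int) (cs : List Char) (i : Nat) (r c : Int) (hi : i < cs.length) :
    goodA n cs i r c 1 ↔
      ¬(r + dRow (cs.getD i ' ') = -1 ∨ r + dRow (cs.getD i ' ') = n ∨
        c + dCol (cs.getD i ' ') = -1 ∨ c + dCol (cs.getD i ' ') = n) := by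
  unfold goodA
  rw [Rsum_succ cs i hi, Csum_succ cs i hi]
  omega

lemma goodA_shift (n : Int) (cs : List Char) (i : Nat) (r c : Int) (t : Nat) (hi : i < cs.length) :
    goodA n cs (i + 1) (r + dRow (cs.getD i ' ')) (c + dCol (cs.getD i ' ')) t ↔
      goodA n cs i r c (t + 1) := by
  unfold goodA
  rw [Rsum_succ cs i hi, Csum_succ cs i hi,
    show i + (t + 1) = i + 1 + t from by omega]
  omega

lemma charA_unique (n : Int) (cs : List Char) (i : Nat) (r c e1 e2 : Int)
    (h1 : CharA n cs i r c e1) (h2 : CharA n cs i r c e2) : e1 = e2 := by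
  obtain ⟨h10, h1m, h1g, h1l⟩ := h1
  obtain ⟨h20, h2m, h2g, h2l⟩ := h2
  by_contra hne
  rcases lt_or_gt_of_ne hne with hlt | hlt
  · rcases h1l with he | hb
    · omega
    · exact hb (h2g (e1.toNat + 1) (by omega) (by omega))
  · rcases h2l with he | hb
    · omega
    · exact hb (h1g (e2.toNat + 1) (by omega) (by omega))

lemma simB_char (n : Int) (cs : List Char) :
    ∀ (kk i : Nat) (r c : Int), i + kk = cs.length →
      CharA n cs i r c (simulateB n r c (cs.drop i)) := by
  intro kk
  induction kk with
  | zero =>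
    intro i r c hi
    rw [List.drop_of_length_le (by omega)]
    simp only [simulateB]
    refine ⟨le_refl 0, by omega, fun t ht1 ht2 => by omega, Or.inl (by omega)⟩
  | succ k ih =>
    intro i r c hi
    have hlt : i < cs.length := by omega
    rw [List.drop_eq_getElem_cons hlt]
    have hget : cs[i] = cs.getD i ' ' := (List.getD_eq_getElem cs ' ' hlt).symm
    rw [hget]
    simp only [simulateB]
    set r' := r + dRow (cs.getD i ' ') with hr'
    set c' := c + dCol (cs.getD i ' ') with hc'
    by_cases hgd : r' = -1 ∨ r' = n ∨ c' = -1 ∨ c' = n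
    · rw [if_pos hgd]
      refine ⟨le_refl 0, by omega, fun t ht1 ht2 => by omega, Or.inr ?_⟩
      intro hgood
      exact (goodA_one n cs i r c hlt).1 (by simpa using hgood) hgd
    · rw [if_neg hgd]
      obtain ⟨e0, em, eg, el⟩ := ih (i + 1) r' c' (by omega)
      set e := simulateB n r' c' (cs.drop (i + 1)) with he
      refine ⟨by omega, by omega, ?_, ?_⟩
      · intro t ht1 ht2
        match t with
        | 1 => exact (goodA_one n cs i r c hlt).2 hgd
        | (u+2) =>
          have := eg (u + 1) (by omega) (by push_cast at ht2 ⊢; omega)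
          exact (goodA_shift n cs i r c (u + 1) hlt).1 this
      · rcases el with heq | hb
        · left; omega
        · right
          intro hgood
          have h1 : (1 + e).toNat + 1 = (e.toNat + 1) + 1 := by omega
          rw [h1] at hgood
          exact hb ((goodA_shift n cs i r c (e.toNat + 1) hlt).2 hgood)

-- arm facts
lemma arm_le (e : Int) (o : Option Int) (i : Int) : arm e o i ≤ e := by
  cases o with
  | none => simp [arm]
  | some j => simp only [arm]; omega

lemma arm_le_some (e : Int) (j i : Int) : arm e (some j) i ≤ j - i - 1 := by
  simp only [arm]; omega

lemma arm_eq_or (e : Int) (o : Option Int) (i : Int) :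
    arm e o i = e ∨ ∃ j, o = some j ∧ arm e o i = j - i - 1 := by
  cases o with
  | none => exact Or.inl (by simp [arm])
  | some j =>
    rcases min_choice e (j - i - 1) with h | h
    · exact Or.inl (by simp only [arm]; exact h)
    · exact Or.inr ⟨j, rfl, by simp only [arm]; exact h⟩

-- the dict invariant of A's reverse loop: keys are the cumulative sums F j for j ∈ [lo, m],
-- each mapped to the least such index
def InvD (F : Nat → Int) (m lo : Nat) (d : PySem.Dict Int Int) : Prop :=
  (∀ v jz, d.get? v = some jz → ∃ j : Nat, jz = (j : Int) ∧ lo ≤ j ∧ j ≤ m ∧ F j = v ∧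
      ∀ j' : Nat, lo ≤ j' → j' ≤ m → F j' = v → j ≤ j') ∧
  (∀ j : Nat, lo ≤ j → j ≤ m → ∃ jz, d.get? (F j) = some jz ∧ jz ≤ (j : Int))

lemma invD_init (F : Nat → Int) (m : Nat) (h0 : F m = 0) :
    InvD F m m (PySem.Dict.empty.insert 0 (m : Int)) := by
  constructor
  · intro v jz hv
    rw [PySem.Dict.get?_insert] at hv
    by_cases hv0 : v = 0
    · rw [if_pos hv0] at hv
      refine ⟨m, (Option.some.inj hv).symm, le_refl m, le_refl m, by rw [h0, hv0],
        fun j' h1 h2 _ => by omega⟩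
    · rw [if_neg hv0] at hv
      simp [PySem.Dict.get?_empty] at hv
  · intro j h1 h2
    have hj : j = m := by omega
    subst hj
    rw [h0]
    exact ⟨(j : Int), by rw [PySem.Dict.get?_insert, if_pos rfl], le_refl _⟩

lemma invD_step (F : Nat → Int) (m k : Nat) (d : PySem.Dict Int Int)
    (hk : k ≤ m) (hd : InvD F m (k + 1) d) :
    InvD F m k (d.insert (F k) (k : Int)) := by
  obtain ⟨h1, h2⟩ := hd
  constructor
  · intro v jz hv
    rw [PySem.Dict.get?_insert] at hv
    by_cases hvk : v = F k
    · rw [if_pos hvk] at hv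
      refine ⟨k, (Option.some.inj hv).symm, le_refl k, hk, hvk.symm, fun j' hj' _ _ => hj'⟩
    · rw [if_neg hvk] at hv
      obtain ⟨j, hjz, hlo, hhi, hF, hmin⟩ := h1 v jz hv
      refine ⟨j, hjz, by omega, hhi, hF, ?_⟩
      intro j' h1' h2' hF'
      have hne : j' ≠ k := fun he => hvk (he ▸ hF').symm
      exact hmin j' (by omega) h2' hF'
  · intro j h1' h2'
    by_cases hjk : j = k
    · subst hjk
      exact ⟨(j : Int), by rw [PySem.Dict.get?_insert, if_pos rfl], le_refl _⟩
    · by_cases hFj : F j = F k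
      · exact ⟨(k : Int), by rw [hFj, PySem.Dict.get?_insert, if_pos rfl], by omega⟩
      · obtain ⟨jz, hjz, hle⟩ := h2 j (by omega) h2'
        exact ⟨jz, by rw [PySem.Dict.get?_insert, if_neg hFj]; exact hjz, hle⟩

-- E is bounded by each fired arm of exeStep
lemma exeStep_le_base (rows cols : PySem.Dict Int Int) (row col up down left right i e0 : Int) :
    exeStep rows cols row col up down left right i e0 ≤ e0 := by
  unfold exeStep
  calc _ ≤ _ := arm_le _ _ _
    _ ≤ _ := arm_le _ _ _
    _ ≤ _ := arm_le _ _ _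
    _ ≤ _ := arm_le _ _ _

lemma exeStep_le_arm1 (rows cols : PySem.Dict Int Int) (row col up down left right i e0 j : Int)
    (h : rows.get? (row - up) = some j) :
    exeStep rows cols row col up down left right i e0 ≤ j - i - 1 := by
  unfold exeStep
  calc _ ≤ _ := arm_le _ _ _
    _ ≤ _ := arm_le _ _ _
    _ ≤ _ := arm_le _ _ _
    _ ≤ j - i - 1 := by rw [h]; exact arm_le_some _ _ _

lemma exeStep_le_arm2 (rows cols : PySem.Dict Int Int) (row col up down left right i e0 j : Int)
    (h : rows.get? (row - down) = some j) :
    exeStep rows cols row col up down left right i e0 ≤ j - i - 1 := by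
  unfold exeStep
  calc _ ≤ _ := arm_le _ _ _
    _ ≤ _ := arm_le _ _ _
    _ ≤ j - i - 1 := by rw [h]; exact arm_le_some _ _ _

lemma exeStep_le_arm3 (rows cols : PySem.Dict Int Int) (row col up down left right i e0 j : Int)
    (h : cols.get? (col - left) = some j) :
    exeStep rows cols row col up down left right i e0 ≤ j - i - 1 := by
  unfold exeStep
  calc _ ≤ _ := arm_le _ _ _
    _ ≤ j - i - 1 := by rw [h]; exact arm_le_some _ _ _

lemma exeStep_le_arm4 (rows cols : PySem.Dict Int Int) (row col up down left right i e0 j : Int)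
    (h : cols.get? (col - right) = some j) :
    exeStep rows cols row col up down left right i e0 ≤ j - i - 1 := by
  unfold exeStep
  rw [h]; exact arm_le_some _ _ _

lemma exeStep_eq_or (rows cols : PySem.Dict Int Int) (row col up down left right i e0 : Int) :
    exeStep rows cols row col up down left right i e0 = e0 ∨
    (∃ j, (rows.get? (row - up) = some j ∨ rows.get? (row - down) = some j ∨
           cols.get? (col - left) = some j ∨ cols.get? (col - right) = some j) ∧
      exeStep rows cols row col up down left right i e0 = j - i - 1) := by
  unfold exeStep
  rcases arm_eq_or (arm (arm (arm e0 (rows.get? (row - up)) i) (rows.get? (row - down)) i)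
      (cols.get? (col - left)) i) (cols.get? (col - right)) i with h4 | ⟨j, hj, hv⟩
  · rw [h4]
    rcases arm_eq_or (arm (arm e0 (rows.get? (row - up)) i) (rows.get? (row - down)) i)
        (cols.get? (col - left)) i with h3 | ⟨j, hj, hv⟩
    · rw [h3]
      rcases arm_eq_or (arm e0 (rows.get? (row - up)) i) (rows.get? (row - down)) i
          with h2 | ⟨j, hj, hv⟩
      · rw [h2]
        rcases arm_eq_or e0 (rows.get? (row - up)) i with h1 | ⟨j, hj, hv⟩
        · exact Or.inl h1
        · exact Or.inr ⟨j, Or.inl hj, hv⟩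
      · exact Or.inr ⟨j, Or.inr (Or.inl hj), hv⟩
    · exact Or.inr ⟨j, Or.inr (Or.inr (Or.inl hj)), hv⟩
  · exact Or.inr ⟨j, Or.inr (Or.inr (Or.inr hj)), hv⟩

-- A's loop body computes a value satisfying the characterisation
lemma exe_char (n p0 p1 : Int) (cs : List Char) (rows cols : PySem.Dict Int Int) (k : Nat)
    (hk : k < cs.length)
    (hR : InvD (Rsum cs) cs.length (k + 1) rows)
    (hC : InvD (Csum cs) cs.length (k + 1) cols) :
    CharA n cs k p0 p1
      (exeStep rows cols (Rsum cs k) (Csum cs k) (-1 - p0) (n - p0) (-1 - p1) (n - p1)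
        (k : Int) ((cs.length : Int) - (k : Int))) := by
  set m := cs.length with hm
  set E := exeStep rows cols (Rsum cs k) (Csum cs k) (-1 - p0) (n - p0) (-1 - p1) (n - p1)
      (k : Int) ((m : Int) - (k : Int)) with hE
  have key1 : Rsum cs k - (-1 - p0) = Rsum cs k + 1 + p0 := by ring
  have key2 : Rsum cs k - (n - p0) = Rsum cs k - n + p0 := by ring
  have key3 : Csum cs k - (-1 - p1) = Csum cs k + 1 + p1 := by ring
  have key4 : Csum cs k - (n - p1) = Csum cs k - n + p1 := by ring
  have hle : E ≤ (m : Int) - (k : Int) := exeStep_le_base _ _ _ _ _ _ _ _ _ _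
  have hcases := exeStep_eq_or rows cols (Rsum cs k) (Csum cs k) (-1 - p0) (n - p0)
      (-1 - p1) (n - p1) (k : Int) ((m : Int) - (k : Int))
  have h0E : 0 ≤ E := by
    rcases hcases with he | ⟨j, hj, hv⟩
    · rw [← hE] at he; omega
    · rw [← hE] at hv
      rcases hj with h | h | h | h
      · obtain ⟨jn, hjz, hlo, _, _, _⟩ := hR.1 _ _ h; omega
      · obtain ⟨jn, hjz, hlo, _, _, _⟩ := hR.1 _ _ h; omega
      · obtain ⟨jn, hjz, hlo, _, _, _⟩ := hC.1 _ _ h; omega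
      · obtain ⟨jn, hjz, hlo, _, _, _⟩ := hC.1 _ _ h; omega
  refine ⟨h0E, hle, ?_, ?_⟩
  · -- every step up to E avoids the boundary ring
    intro t ht1 ht2
    by_contra hbad
    unfold goodA at hbad
    have hktm : k + t ≤ m := by omega
    -- the bad step names a dict key exactly: E must be below t, contradiction
    have hcross :
        Rsum cs (k + t) = Rsum cs k + 1 + p0 ∨ Rsum cs (k + t) = Rsum cs k - n + p0 ∨
        Csum cs (k + t) = Csum cs k + 1 + p1 ∨ Csum cs (k + t) = Csum cs k - n + p1 := by
      omega
    have hcontr : E ≤ (t : Int) - 1 := by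
      rcases hcross with hc | hc | hc | hc
      · obtain ⟨jz, hjz, hjle⟩ := hR.2 (k + t) (by omega) hktm
        rw [hc, ← key1] at hjz
        have := exeStep_le_arm1 rows cols (Rsum cs k) (Csum cs k) (-1 - p0) (n - p0)
            (-1 - p1) (n - p1) (k : Int) ((m : Int) - (k : Int)) jz hjz
        rw [← hE] at this
        push_cast at hjle ⊢
        omega
      · obtain ⟨jz, hjz, hjle⟩ := hR.2 (k + t) (by omega) hktm
        rw [hc, ← key2] at hjz
        have := exeStep_le_arm2 rows cols (Rsum cs k) (Csum cs k) (-1 - p0) (n - p0)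
            (-1 - p1) (n - p1) (k : Int) ((m : Int) - (k : Int)) jz hjz
        rw [← hE] at this
        push_cast at hjle ⊢
        omega
      · obtain ⟨jz, hjz, hjle⟩ := hC.2 (k + t) (by omega) hktm
        rw [hc, ← key3] at hjz
        have := exeStep_le_arm3 rows cols (Rsum cs k) (Csum cs k) (-1 - p0) (n - p0)
            (-1 - p1) (n - p1) (k : Int) ((m : Int) - (k : Int)) jz hjz
        rw [← hE] at this
        push_cast at hjle ⊢
        omega
      · obtain ⟨jz, hjz, hjle⟩ := hC.2 (k + t) (by omega) hktm
        rw [hc, ← key4] at hjz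
        have := exeStep_le_arm4 rows cols (Rsum cs k) (Csum cs k) (-1 - p0) (n - p0)
            (-1 - p1) (n - p1) (k : Int) ((m : Int) - (k : Int)) jz hjz
        rw [← hE] at this
        push_cast at hjle ⊢
        omega
    omega
  · -- E = m - k, or the very next step lands on the boundary ring
    rcases hcases with he | ⟨j, hj, hv⟩
    · rw [← hE] at he; exact Or.inl he
    · rw [← hE] at hv
      right
      intro hgood
      unfold goodA at hgood
      rcases hj with h | h | h | h
      · obtain ⟨jn, hjz, hlo, hhi, hF, _⟩ := hR.1 _ _ h
        rw [key1] at hF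
        have hju : k + (E.toNat + 1) = jn := by omega
        rw [hju, hF] at hgood
        omega
      · obtain ⟨jn, hjz, hlo, hhi, hF, _⟩ := hR.1 _ _ h
        rw [key2] at hF
        have hju : k + (E.toNat + 1) = jn := by omega
        rw [hju, hF] at hgood
        omega
      · obtain ⟨jn, hjz, hlo, hhi, hF, _⟩ := hC.1 _ _ h
        rw [key3] at hF
        have hju : k + (E.toNat + 1) = jn := by omega
        rw [hju, hF] at hgood
        omega
      · obtain ⟨jn, hjz, hlo, hhi, hF, _⟩ := hC.1 _ _ h
        rw [key4] at hF
        have hju : k + (E.toNat + 1) = jn := by omega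
        rw [hju, hF] at hgood
        omega

-- the loop invariant proof for goA
lemma goA_eq (n p0 p1 : Int) (cs : List Char) :
    ∀ (k : Nat), k ≤ cs.length → ∀ (rows cols : PySem.Dict Int Int) (res : List Int),
      InvD (Rsum cs) cs.length k rows → InvD (Csum cs) cs.length k cols →
      goA cs cs.length (-1 - p0) (n - p0) (-1 - p1) (n - p1) k rows cols
          (Rsum cs k) (Csum cs k) res
        = res ++ ((List.range k).reverse.map (fun i => simulateB n p0 p1 (cs.drop i))) := by
  intro k
  induction k with
  | zero => intro _ rows cols res _ _; simp [goA]
  | succ k ih =>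
    intro hk rows cols res hR hC
    have hklt : k < cs.length := by omega
    have hrow : Rsum cs (k + 1) + dRow (cs.getD k ' ') = Rsum cs k := by
      rw [Rsum_succ cs k hklt]; ring
    have hcol : Csum cs (k + 1) + dCol (cs.getD k ' ') = Csum cs k := by
      rw [Csum_succ cs k hklt]; ring
    have hchar := exe_char n p0 p1 cs rows cols k hklt hR hC
    have hsim := simB_char n cs (cs.length - k) k p0 p1 (by omega)
    have hexe : exeStep rows cols (Rsum cs k) (Csum cs k) (-1 - p0) (n - p0) (-1 - p1) (n - p1)
        (k : Int) ((cs.length : Int) - (k : Int)) = simulateB n p0 p1 (cs.drop k) :=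
      charA_unique n cs k p0 p1 _ _ hchar hsim
    simp only [goA, hrow, hcol]
    rw [hexe]
    rw [ih (by omega) (rows.insert (Rsum cs k) (k : Int)) (cols.insert (Csum cs k) (k : Int))
      (res ++ [simulateB n p0 p1 (cs.drop k)])
      (invD_step (Rsum cs) cs.length k rows (by omega) hR)
      (invD_step (Csum cs) cs.length k cols (by omega) hC)]
    rw [List.range_succ, List.reverse_append]
    simp

lemma Rsum_length (cs : List Char) : Rsum cs cs.length = 0 := by
  unfold Rsum; simp

lemma Csum_length (cs : List Char) : Csum cs cs.length = 0 := by
  unfold Csum; simp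

-- ===== VERDICT (by name: the statement is the Claim_ definition above) =====
theorem executeInstructions_spec : Claim_equal_executeInstructions := by
  intro n startPos s _ _
  unfold Spec_executeInstructions executeInstructions executeInstructions_alt
  set cs := s.toList with hcs
  set p0 := startPos.getD 0 0 with hp0
  set p1 := startPos.getD 1 0 with hp1
  have hmain := goA_eq n p0 p1 cs cs.length (le_refl _)
    (PySem.Dict.empty.insert 0 (cs.length : Int))
    (PySem.Dict.empty.insert 0 (cs.length : Int)) []
    (invD_init (Rsum cs) cs.length (Rsum_length cs))
    (invD_init (Csum cs) cs.length (Csum_length cs))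
  rw [Rsum_length, Csum_length] at hmain
  simp only []
  rw [hmain]
  simp [List.map_reverse]
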